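-- pv_equiv track=rewrite | github.com/yavuzerbas/Cng-438-Assignment2 | assignment2.py | takeToOriginalOrder
-- ===== SOURCE A (Python) =====
-- def takeToOriginalOrder(subStrings,key):
--     originalOrder = []
--     for letter in key:
--         for i in range(len(subStrings)):
--             if letter == subStrings[i][0]:
--                 originalOrder.append(subStrings[i][1:])
--                 subStrings.pop(i)
--                 break
--     return originalOrder
-- ===== SOURCE B (Python) =====
-- def takeToOriginalOrder(subStrings, key):
--     # Build per-first-character FIFO queues once (skipping empty strings), then pop
--     # the front entry per key letter: removes the per-letter rescan of the list.
--     # Unlike the original, this does not mutate subStrings; the equivalence claimed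
--     # is about the return value.
--     queues = {}
--     for s in subStrings:
--         if s:
--             queues.setdefault(s[0], []).append(s[1:])
--     out = []
--     for letter in key:
--         q = queues.get(letter)
--         if q:
--             out.append(q.pop(0))
--     return out
-- ===== Notes on version B (the rewrite author's own statement) =====
-- stated objective: faster
-- what changed: Instead of rescanning and mutating the list for every key letter, B groups the non-empty substrings once into per-first-character FIFO queues and pops the front matching entry per key letter (B does not mutate subStrings; the claim is about the return value).
import Mathlib
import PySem

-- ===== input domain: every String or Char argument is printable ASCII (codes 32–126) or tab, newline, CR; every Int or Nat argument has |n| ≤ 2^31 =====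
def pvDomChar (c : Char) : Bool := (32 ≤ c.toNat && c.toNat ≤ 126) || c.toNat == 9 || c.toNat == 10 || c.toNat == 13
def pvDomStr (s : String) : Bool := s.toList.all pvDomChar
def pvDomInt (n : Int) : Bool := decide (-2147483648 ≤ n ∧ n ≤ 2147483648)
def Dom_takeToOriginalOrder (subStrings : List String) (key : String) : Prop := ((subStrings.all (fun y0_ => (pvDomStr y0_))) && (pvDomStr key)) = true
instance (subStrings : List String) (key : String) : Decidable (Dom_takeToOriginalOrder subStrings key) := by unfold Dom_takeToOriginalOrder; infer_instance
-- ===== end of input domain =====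

-- B groups the non-empty substrings once into per-first-character queues and pops the
-- front per key letter instead of rescanning the list; A mutates subStrings in place
-- (pop), B does not: the equivalence proved here is about the return value only.


-- ===== PORT A =====
-- inner loop 'for i in range(len(subStrings)): if letter == subStrings[i][0]: append s[1:]; pop(i); break'
-- as the obvious structural scan. On an empty string Python raises IndexError; under
-- Pre_ the scan always matches strictly before any empty string, so skipping the
-- (unreachable there) empty case keeps the port exact on Pre_.
def scanA (letter : Char) : List String → Option (String × List String)
  | [] => none
  | s :: rest =>
    match s.toList with
    | [] => (scanA letter rest).map (fun p => (p.1, s :: p.2))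
    | c :: t => if c = letter then some (String.mk t, rest)
                else (scanA letter rest).map (fun p => (p.1, s :: p.2))

def takeToOriginalOrder (subStrings : List String) (key : String) : List String :=
  (key.toList.foldl (fun (st : List String × List String) letter =>
      match scanA letter st.1 with
      | none => st
      | some (r, subs') => (subs', st.2 ++ [r])) (subStrings, ([] : List String))).2

-- ===== PORT B =====
-- 'for s in subStrings: if s: queues.setdefault(s[0], []).append(s[1:])'
def headRestPairs (subStrings : List String) : List (Char × String) :=
  subStrings.filterMap (fun s => match s.toList with
    | [] => none
    | c :: t => some (c, String.mk t))

-- queues.setdefault(c, []).append(rest)  ==  queues[c] = queues.get(c, []) + [rest]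
def buildQueues (subStrings : List String) : PySem.Dict Char (List String) :=
  (headRestPairs subStrings).foldl (fun d p => d.modify p.1 [] (· ++ [p.2])) PySem.Dict.empty

def takeToOriginalOrder_alt (subStrings : List String) (key : String) : List String :=
  (key.toList.foldl (fun (st : PySem.Dict Char (List String) × List String) letter =>
      match st.1.get? letter with
      | none => st                         -- q is None
      | some [] => st                      -- 'if q:' falsy
      | some (r :: rs) => (st.1.insert letter rs, st.2 ++ [r]))   -- q.pop(0)
    (buildQueues subStrings, ([] : List String))).2

-- ===== PRECONDITION & SPEC =====
-- Pre_ excludes exactly the inputs on which A raises IndexError: those where an empty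
-- string is present and some key letter occurs in key more often than strings starting
-- with it occur before the first empty string (that letter's scan then reaches the
-- empty string and Python evaluates ""[0]).
def Pre_takeToOriginalOrder (subStrings : List String) (key : String) : Prop :=
  "" ∈ subStrings →
    ∀ c ∈ key.toList,
      key.toList.count c ≤
        (subStrings.takeWhile (· ≠ "")).countP (fun s => s.toList.head? = some c)
instance (subStrings : List String) (key : String) : Decidable (Pre_takeToOriginalOrder subStrings key) := by unfold Pre_takeToOriginalOrder; infer_instance

def pvWitness_takeToOriginalOrder : List String × String := (["ab", "ba", "aq"], "ab")

def Spec_takeToOriginalOrder (subStrings : List String) (key : String) (out : List String) : Prop := out = takeToOriginalOrder_alt subStrings key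
instance (subStrings : List String) (key : String) (out : List String) : Decidable (Spec_takeToOriginalOrder subStrings key out) := by unfold Spec_takeToOriginalOrder; infer_instance

-- ===== CLAIM (what is proved, stated in full; the proofs are below) =====
def Claim_equal_takeToOriginalOrder : Prop := ∀ (subStrings : List String) (key : String), Dom_takeToOriginalOrder subStrings key → Pre_takeToOriginalOrder subStrings key → Spec_takeToOriginalOrder subStrings key (takeToOriginalOrder subStrings key)


-- ===== LEMMAS AND PROOFS =====

-- the rests (s[1:]) of the non-empty substrings whose first char is c, in list order
def restsOf (subs : List String) (c : Char) : List String :=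
  subs.filterMap (fun s => match s.toList with
    | [] => none
    | c' :: t => if c' = c then some (String.mk t) else none)

theorem buildQueues_getD (subs : List String) (c : Char) :
    (buildQueues subs).getD c [] = restsOf subs c := by
  unfold buildQueues
  rw [PySem.Dict.getD_foldl_modify_append]
  simp only [PySem.Dict.getD_empty, List.nil_append]
  unfold headRestPairs restsOf
  induction subs with
  | nil => rfl
  | cons s rest ih =>
    cases h : s.toList with
    | nil => simpa [List.filterMap_cons, h] using ih
    | cons c' t =>
      by_cases hc : c' = c
      · simp [List.filterMap_cons, h, hc, ih]
      · simp [List.filterMap_cons, h, hc, ih]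

theorem scanA_of_restsOf_nil (c : Char) (subs : List String)
    (h : restsOf subs c = []) : scanA c subs = none := by
  induction subs with
  | nil => rfl
  | cons s rest ih =>
    cases hl : s.toList with
    | nil =>
      unfold restsOf at h
      rw [List.filterMap_cons, hl] at h
      simp [scanA, hl, ih h]
    | cons c' t =>
      unfold restsOf at h
      rw [List.filterMap_cons, hl] at h
      by_cases hc : c' = c
      · simp [hc] at h
      · simp only [if_neg hc] at h
        simp [scanA, hl, hc, ih h]

theorem scanA_of_restsOf_cons (c : Char) (subs : List String) (r : String) (rs : List String)
    (h : restsOf subs c = r :: rs) :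
    ∃ subs', scanA c subs = some (r, subs') ∧ restsOf subs' c = rs ∧
      ∀ c', c' ≠ c → restsOf subs' c' = restsOf subs c' := by
  induction subs with
  | nil => simp [restsOf] at h
  | cons s rest ih =>
    cases hl : s.toList with
    | nil =>
      unfold restsOf at h
      rw [List.filterMap_cons, hl] at h
      obtain ⟨subs', hscan, hres, hother⟩ := ih h
      refine ⟨s :: subs', ?_, ?_, ?_⟩
      · simp [scanA, hl, hscan]
      · simpa [restsOf, List.filterMap_cons, hl] using hres
      · intro c'' hc''
        have hoth := hother c'' hc''
        unfold restsOf at hoth ⊢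
        simp only [List.filterMap_cons, hl]
        simp [hoth]
    | cons c' t =>
      unfold restsOf at h
      rw [List.filterMap_cons, hl] at h
      by_cases hc : c' = c
      · simp only [if_pos hc, List.cons.injEq] at h
        refine ⟨rest, ?_, ?_, ?_⟩
        · simp [scanA, hl, hc, h.1]
        · exact h.2 ▸ rfl
        · intro c'' hc''
          have : ¬ c' = c'' := hc ▸ fun he => hc'' he.symm
          simp [restsOf, List.filterMap_cons, hl, this]
      · simp only [if_neg hc] at h
        obtain ⟨subs', hscan, hres, hother⟩ := ih h
        refine ⟨s :: subs', ?_, ?_, ?_⟩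
        · simp [scanA, hl, hc, hscan]
        · simpa [restsOf, List.filterMap_cons, hl, hc] using hres
        · intro c'' hc''
          have hoth := hother c'' hc''
          unfold restsOf at hoth ⊢
          simp only [List.filterMap_cons, hl]
          by_cases h2 : c' = c''
          · simp [h2, hoth]
          · simp [h2, hoth]

theorem main_loop (ks : List Char) (subs : List String) (d : PySem.Dict Char (List String))
    (out : List String)
    (hinv : ∀ c, d.getD c [] = restsOf subs c) :
    (ks.foldl (fun (st : List String × List String) letter =>
      match scanA letter st.1 with
      | none => st
      | some (r, subs') => (subs', st.2 ++ [r])) (subs, out)).2 =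
    (ks.foldl (fun (st : PySem.Dict Char (List String) × List String) letter =>
      match st.1.get? letter with
      | none => st
      | some [] => st
      | some (r :: rs) => (st.1.insert letter rs, st.2 ++ [r])) (d, out)).2 := by
  induction ks generalizing subs d out with
  | nil => rfl
  | cons c ks ih =>
    simp only [List.foldl_cons]
    cases hres : restsOf subs c with
    | nil =>
      have hA : scanA c subs = none := scanA_of_restsOf_nil c subs hres
      have hgetD : d.getD c [] = [] := (hinv c).trans hres
      rw [hA]
      cases hget : d.get? c with
      | none => exact ih subs d out hinv
      | some q =>
        have : q = [] := by
          have := PySem.Dict.getD_eq_get?_getD d c ([] : List String)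
          rw [hget] at this
          simpa [this] using hgetD
        subst this
        exact ih subs d out hinv
    | cons r rs =>
      obtain ⟨subs', hscan, hres', hother⟩ := scanA_of_restsOf_cons c subs r rs hres
      have hget : d.get? c = some (r :: rs) := by
        have h1 : d.getD c [] = r :: rs := (hinv c).trans hres
        cases hg : d.get? c with
        | none =>
          have := PySem.Dict.getD_eq_get?_getD d c ([] : List String)
          rw [hg] at this; rw [this] at h1; cases h1
        | some q =>
          have := PySem.Dict.getD_eq_get?_getD d c ([] : List String)
          rw [hg] at this; rw [this] at h1; simpa [h1]
      rw [hscan, hget]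
      refine ih subs' (d.insert c rs) (out ++ [r]) ?_
      intro c'
      by_cases hc : c' = c
      · subst hc
        rw [PySem.Dict.getD_insert_self, hres']
      · rw [PySem.Dict.getD_insert, if_neg hc, hinv c', hother c' hc]

-- ===== VERDICT (by name: the statement is the Claim_ definition above) =====
theorem takeToOriginalOrder_spec : Claim_equal_takeToOriginalOrder := by
  intro subStrings key _ _
  unfold Spec_takeToOriginalOrder takeToOriginalOrder takeToOriginalOrder_alt
  exact main_loop key.toList subStrings (buildQueues subStrings) []
    (fun c => buildQueues_getD subStrings c)
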